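-- pv_equiv track=rewrite | github.com/eduardoslonski/telescope | src/telescope/orchestrator/generate.py | _find_largest_overlap
-- ===== SOURCE A (Python) =====
-- def _find_largest_overlap(a: list[int], b: list[int]) -> int:
--     """
--     Find the largest overlapping sequence between the end of a and beginning of b.
--
--     This is used to handle chat template suffix tokens that may already be
--     present at the end of the completion.
--     """
--     if not a or not b:
--         return 0
--
--     max_possible = min(len(a), len(b))
--     for overlap_len in reversed(range(1, max_possible + 1)):
--         a_suffix = a[-overlap_len:]
--         b_prefix = b[:overlap_len]
--
--         if a_suffix == b_prefix:
--             return overlap_len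
--
--     return 0
-- ===== SOURCE B (Python) =====
-- def _find_largest_overlap(a: list[int], b: list[int]) -> int:
--     # One forward pass over a, maintaining every length l such that b[:l]
--     # equals the suffix of the processed part of a (naive multi-candidate
--     # automaton); the answer is the largest surviving candidate.
--     cands = []
--     for x in a:
--         cands = [l + 1 for l in cands + [0] if l < len(b) and b[l] == x]
--     return max(cands, default=0)
-- ===== Notes on version B (the rewrite author's own statement) =====
-- stated objective: faster
-- what changed: A scans candidate overlap lengths from largest to smallest, rebuilding and comparing a full a-suffix and b-prefix slice for each candidate; B makes a single forward pass over a, maintaining the list of prefix lengths of b that currently match a suffix of the processed part (each element extends or kills every live candidate), and returns the maximum surviving length.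
import Mathlib
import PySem

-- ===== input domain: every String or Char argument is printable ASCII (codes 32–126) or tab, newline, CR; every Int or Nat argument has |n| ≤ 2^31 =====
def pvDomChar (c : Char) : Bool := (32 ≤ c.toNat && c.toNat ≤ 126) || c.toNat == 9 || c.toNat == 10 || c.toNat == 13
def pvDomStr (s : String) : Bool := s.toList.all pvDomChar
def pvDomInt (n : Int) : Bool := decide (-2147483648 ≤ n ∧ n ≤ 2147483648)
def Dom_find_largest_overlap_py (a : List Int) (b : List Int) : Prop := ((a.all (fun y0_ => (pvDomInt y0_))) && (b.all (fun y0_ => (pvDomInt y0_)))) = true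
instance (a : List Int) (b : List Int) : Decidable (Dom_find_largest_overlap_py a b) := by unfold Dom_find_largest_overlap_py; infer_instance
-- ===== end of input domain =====

-- B replaces A's descending scan over candidate overlap lengths (each checking two
-- fresh slices) by a single forward pass over `a` that maintains the set of prefix
-- lengths of `b` currently matching a suffix of the processed part, then takes the max.

-- ===== PORT A =====
-- the 'for overlap_len in reversed(range(1, max_possible+1)): … return overlap_len' loop,
-- as structural recursion over the (already reversed) list of candidate lengths
def pyA_loop (a : List Int) (b : List Int) : List Int → Int
  | [] => 0
  | overlap_len :: rest =>
    let a_suffix := PySem.List.slice a (some (-overlap_len)) none   -- a[-overlap_len:]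
    let b_prefix := PySem.List.slice b none (some overlap_len)     -- b[:overlap_len]
    if a_suffix = b_prefix then overlap_len else pyA_loop a b rest

def find_largest_overlap_py (a : List Int) (b : List Int) : Int :=
  if a = [] ∨ b = [] then 0
  else
    let max_possible : Int := min (a.length : Int) (b.length : Int)
    pyA_loop a b ((PySem.List.pyRange 1 (max_possible + 1) 1).reverse)

-- ===== PORT B =====
-- cands = [l + 1 for l in cands + [0] if l < len(b) and b[l] == x]
def pyB_step (b : List Int) (cands : List Int) (x : Int) : List Int :=
  ((cands ++ [0]).filter
      (fun l => decide (l < (b.length : Int)) && (PySem.List.pyGet? b l == some x))).map (· + 1)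

-- max(cands, default=0): every candidate is ≥ 1, so a fold of `max` from 0 is Python's max
def find_largest_overlap_py_alt (a : List Int) (b : List Int) : Int :=
  (a.foldl (pyB_step b) []).foldl max 0

-- ===== PRECONDITION & SPEC =====
def Spec_find_largest_overlap_py (a : List Int) (b : List Int) (out : Int) : Prop := out = find_largest_overlap_py_alt a b
instance (a : List Int) (b : List Int) (out : Int) : Decidable (Spec_find_largest_overlap_py a b out) := by unfold Spec_find_largest_overlap_py; infer_instance

-- ===== CLAIM (what is proved, stated in full; the proofs are below) =====
def Claim_equal_find_largest_overlap_py : Prop := ∀ (a : List Int) (b : List Int), Dom_find_largest_overlap_py a b → Spec_find_largest_overlap_py a b (find_largest_overlap_py a b)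

-- ===== LEMMAS AND PROOFS =====

-- A's loop over [m, m-1, …, 1] is Nat.findGreatest
lemma pyA_loop_eq (a b : List Int) (m : Nat) (hm : m ≤ a.length) (hmb : m ≤ b.length) :
    pyA_loop a b ((PySem.List.pyRange 1 ((m : Int) + 1) 1).reverse)
      = (Nat.findGreatest (fun k => a.drop (a.length - k) = b.take k) m : Int) := by
  induction m with
  | zero =>
    rw [PySem.List.pyRange_one_eq_nil (by omega)]
    simp [pyA_loop]
  | succ n ih =>
    rw [show ((n + 1 : Nat) : Int) + 1 = ((n + 1 : Nat) : Int) + 1 from rfl,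
      PySem.List.pyRange_one_succ_right (by push_cast; omega)]
    simp only [List.reverse_append, List.reverse_cons, List.reverse_nil, List.nil_append,
      List.cons_append, pyA_loop]
    rw [PySem.List.slice_from_neg_natCast a (n + 1) (by omega), PySem.List.slice_to_natCast,
      Nat.findGreatest_succ]
    have ih' := ih (by omega) (by omega)
    rw [show ((n : Int) + 1) = ((n + 1 : Nat) : Int) by omega] at ih'
    rcases eq_or_ne (List.drop (a.length - (n + 1)) a) (List.take (n + 1) b) with h | h
    · rw [if_pos h, if_pos h]
    · rw [if_neg h, if_neg h, ih']

-- membership in B's candidate list after processing p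
lemma cands_mem (b p : List Int) : ∀ l : Int,
    l ∈ p.foldl (pyB_step b) [] ↔
      ∃ k : Nat, l = (k : Int) ∧ 1 ≤ k ∧ k ≤ b.length ∧ k ≤ p.length ∧
        p.drop (p.length - k) = b.take k := by
  induction p using List.reverseRecOn with
  | nil => simp
  | append_singleton p x ih =>
    intro l
    rw [List.foldl_append]
    simp only [List.foldl_cons, List.foldl_nil]
    unfold pyB_step
    simp only [List.mem_map, List.mem_filter, List.mem_append, List.mem_singleton]
    have hdrop : ∀ k' : Nat, k' ≤ p.length →
        (p ++ [x]).drop ((p ++ [x]).length - (k' + 1)) = p.drop (p.length - k') ++ [x] := by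
      intro k' hk'
      have h1 : (p ++ [x]).length - (k' + 1) = p.length - k' := by simp
      rw [h1, List.drop_append_of_le_length (by omega)]
    constructor
    · rintro ⟨l', ⟨hl'mem, hcond⟩, rfl⟩
      simp only [Bool.and_eq_true, decide_eq_true_eq, beq_iff_eq] at hcond
      obtain ⟨hlt, hget⟩ := hcond
      rcases hl'mem with hmem | rfl
      · obtain ⟨k', rfl, hk'1, hk'b, hk'p, heq⟩ := (ih l').mp hmem
        have hk'b' : k' < b.length := by exact_mod_cast hlt
        refine ⟨k' + 1, by omega, by omega, by omega, by simp only [List.length_append, List.length_cons, List.length_nil]; omega, ?_⟩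
        rw [PySem.List.pyGet?_natCast] at hget
        rw [hdrop k' hk'p, List.take_add_one, hget]
        simp [heq]
      · have h0b : 0 < b.length := by exact_mod_cast hlt
        rw [PySem.List.pyGet?_zero] at hget
        refine ⟨1, by norm_num, le_refl 1, by omega, by simp, ?_⟩
        have h1 : (p ++ [x]).length - 1 = p.length := by simp
        rw [h1, List.drop_left]
        cases b with
        | nil => simp at h0b
        | cons y ys => simp at hget; simp [hget]
    · rintro ⟨k, rfl, hk1, hkb, hkp, heq⟩
      obtain ⟨k', rfl⟩ : ∃ k', k = k' + 1 := ⟨k - 1, by omega⟩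
      have hk'b : k' < b.length := by omega
      have hk'p : k' ≤ p.length := by simp at hkp; omega
      rw [hdrop k' hk'p, List.take_add_one, List.getElem?_eq_getElem hk'b] at heq
      obtain ⟨h1, h2⟩ := List.append_inj' heq (by simp)
      refine ⟨(k' : Int), ⟨?_, ?_⟩, by omega⟩
      · rcases Nat.eq_zero_or_pos k' with rfl | hpos
        · right; simp
        · left
          exact (ih (k' : Int)).mpr ⟨k', rfl, hpos, by omega, hk'p, h1⟩
      · simp only [Bool.and_eq_true, decide_eq_true_eq, beq_iff_eq]
        refine ⟨by exact_mod_cast hk'b, ?_⟩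
        rw [PySem.List.pyGet?_natCast, List.getElem?_eq_getElem hk'b]
        simp at h2
        simp [h2]

-- folding max over Int lists
lemma foldl_max_ge (xs : List Int) (i : Int) : i ≤ xs.foldl max i := by
  induction xs generalizing i with
  | nil => simp
  | cons y ys ih => simpa using le_trans (le_max_left i y) (ih (max i y))

lemma foldl_max_le (xs : List Int) (i : Int) (x : Int) (hx : x ∈ xs) : x ≤ xs.foldl max i := by
  induction xs generalizing i with
  | nil => simp at hx
  | cons y ys ih =>
    rcases List.mem_cons.mp hx with rfl | hx
    · simpa using le_trans (le_max_right i x) (foldl_max_ge ys (max i x))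
    · exact ih (max i y) hx

lemma foldl_max_mem (xs : List Int) (i : Int) : xs.foldl max i = i ∨ xs.foldl max i ∈ xs := by
  induction xs generalizing i with
  | nil => simp
  | cons y ys ih =>
    simp only [List.foldl_cons]
    rcases ih (max i y) with h | h
    · rcases max_cases i y with ⟨hm, _⟩ | ⟨hm, _⟩
      · left; rw [h, hm]
      · right; rw [h, hm]; simp
    · right; simp [h]

-- B equals Nat.findGreatest over min(len a, len b)
lemma alt_eq (a b : List Int) :
    find_largest_overlap_py_alt a b
      = (Nat.findGreatest (fun k => a.drop (a.length - k) = b.take k) (min a.length b.length) : Int) := by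
  unfold find_largest_overlap_py_alt
  have hmem := cands_mem b a
  obtain ⟨hgle, hPg, -⟩ := Nat.findGreatest_eq_iff.mp
    (Eq.refl (Nat.findGreatest (fun k => a.drop (a.length - k) = b.take k) (min a.length b.length)))
  have hgin : 0 < Nat.findGreatest (fun k => a.drop (a.length - k) = b.take k) (min a.length b.length) →
      ((Nat.findGreatest (fun k => a.drop (a.length - k) = b.take k) (min a.length b.length) : Int)) ∈ a.foldl (pyB_step b) [] := by
    intro hpos
    exact (hmem _).mpr ⟨_, rfl, hpos, by omega, by omega, hPg (by omega)⟩
  rcases foldl_max_mem (a.foldl (pyB_step b) []) 0 with h0 | hmemM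
  · rw [h0]
    rcases Nat.eq_zero_or_pos (Nat.findGreatest (fun k => a.drop (a.length - k) = b.take k) (min a.length b.length)) with hz | hpos
    · rw [hz]; rfl
    · have := foldl_max_le _ 0 _ (hgin hpos)
      rw [h0] at this
      omega
  · obtain ⟨k, hk, hk1, hkb, hka, hgood⟩ := (hmem _).mp hmemM
    rw [hk]
    have h1 : k ≤ Nat.findGreatest (fun k => a.drop (a.length - k) = b.take k) (min a.length b.length) :=
      Nat.le_findGreatest (by omega) hgood
    have h2 : ((Nat.findGreatest (fun k => a.drop (a.length - k) = b.take k) (min a.length b.length) : Int)) ≤ (k : Int) := by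
      rcases Nat.eq_zero_or_pos (Nat.findGreatest (fun k => a.drop (a.length - k) = b.take k) (min a.length b.length)) with hz | hpos
      · rw [hz]; omega
      · have := foldl_max_le _ 0 _ (hgin hpos)
        rw [hk] at this
        exact this
    omega

-- A equals the same findGreatest
lemma a_eq (a b : List Int) :
    find_largest_overlap_py a b
      = (Nat.findGreatest (fun k => a.drop (a.length - k) = b.take k) (min a.length b.length) : Int) := by
  unfold find_largest_overlap_py
  by_cases h : a = [] ∨ b = []
  · rw [if_pos h]
    rcases h with rfl | rfl <;> simp
  · rw [if_neg h]
    have hmin : min ((a.length : Int)) ((b.length : Int)) = ((min a.length b.length : Nat) : Int) := by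
      push_cast; rfl
    rw [hmin]
    exact pyA_loop_eq a b (min a.length b.length) (by omega) (by omega)

-- ===== VERDICT (by name: the statement is the Claim_ definition above) =====
theorem find_largest_overlap_py_spec : Claim_equal_find_largest_overlap_py := by
  intro a b _
  unfold Spec_find_largest_overlap_py
  rw [a_eq, alt_eq]
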